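-- pv_equiv track=rewrite | github.com/Olivercomet/MorcuTool | MorcuTool/io_s3py_animation-1.60/s3py/blender/__init__.py | invalid_face
-- ===== SOURCE A (Python) =====
-- def invalid_face(face):
--     if not face: return  True
--     f2 = face[:]
--     a = None
--     while len(f2):
--         a = f2.pop()
--         if a in f2:
--             return True
--     return False
-- ===== SOURCE B (Python) =====
-- def invalid_face(face):
--     if not face:
--         return True
--     s = sorted(face)
--     for prev, cur in zip(s, s[1:]):
--         if prev == cur:
--             return True
--     return False
-- ===== Notes on version B (the rewrite author's own statement) =====
-- stated objective: alternative
-- what changed: Replaces A's repeated pop-and-membership duplicate test with a sort followed by a single adjacent-equality pass.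
import Mathlib
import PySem

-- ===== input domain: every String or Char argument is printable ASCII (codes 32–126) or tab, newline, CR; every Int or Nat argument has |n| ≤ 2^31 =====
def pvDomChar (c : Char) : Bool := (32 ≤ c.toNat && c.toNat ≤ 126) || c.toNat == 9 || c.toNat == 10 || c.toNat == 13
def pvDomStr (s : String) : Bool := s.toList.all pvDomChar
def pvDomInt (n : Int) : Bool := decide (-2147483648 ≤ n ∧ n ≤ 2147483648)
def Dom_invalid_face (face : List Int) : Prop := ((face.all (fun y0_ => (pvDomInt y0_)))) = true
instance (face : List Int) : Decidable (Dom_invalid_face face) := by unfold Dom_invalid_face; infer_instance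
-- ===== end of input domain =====

-- B detects duplicates by sorting and scanning adjacent pairs instead of A's pop-and-membership loop (alternative algorithm, same result).

-- ===== PORT A =====
-- the while loop: pop the last element, return True if it is still in the remainder
def invalid_face_loop : List Int → Bool
  | [] => false
  | x :: xs =>
    let a := (x :: xs).getLast (by simp)
    let rest := (x :: xs).dropLast
    if a ∈ rest then true else invalid_face_loop rest
termination_by f2 => f2.length
decreasing_by simp

def invalid_face (face : List Int) : Bool :=
  if face.isEmpty then true else invalid_face_loop face

-- ===== PORT B =====
-- for prev, cur in zip(s, s[1:]): return True on the first adjacent equal pair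
def invalid_face_scan : List Int → Bool
  | prev :: cur :: rest => if prev == cur then true else invalid_face_scan (cur :: rest)
  | _ => false

def invalid_face_alt (face : List Int) : Bool :=
  if face.isEmpty then true
  else invalid_face_scan (PySem.List.sorted face (fun x => x) false)

-- ===== PRECONDITION & SPEC =====
def Spec_invalid_face (face : List Int) (out : Bool) : Prop := out = invalid_face_alt face
instance (face : List Int) (out : Bool) : Decidable (Spec_invalid_face face out) := by unfold Spec_invalid_face; infer_instance

-- ===== CLAIM (what is proved, stated in full; the proofs are below) =====
def Claim_equal_invalid_face : Prop := ∀ (face : List Int), Dom_invalid_face face → Spec_invalid_face face (invalid_face face)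

-- ===== LEMMAS AND PROOFS =====

lemma invalid_face_loop_concat (l : List Int) (a : Int) :
    invalid_face_loop (l ++ [a]) = if a ∈ l then true else invalid_face_loop l := by
  rw [invalid_face_loop.eq_def]
  cases h : l ++ [a] with
  | nil => simp at h
  | cons x xs =>
    simp only [← h, List.getLast_concat, List.dropLast_concat]

lemma invalid_face_loop_eq (l : List Int) :
    invalid_face_loop l = !decide l.Nodup := by
  induction l using List.reverseRecOn with
  | nil => simp [invalid_face_loop]
  | append_singleton l a ih =>
    rw [invalid_face_loop_concat, ih]
    by_cases h : a ∈ l <;> simp [h, List.nodup_append]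

lemma invalid_face_scan_eq (l : List Int) (hs : l.Pairwise (· ≤ ·)) :
    invalid_face_scan l = !decide l.Nodup := by
  induction l with
  | nil => simp [invalid_face_scan]
  | cons x xs ih =>
    cases xs with
    | nil => simp [invalid_face_scan]
    | cons y rest =>
      rw [List.pairwise_cons] at hs
      obtain ⟨hx, hrest⟩ := hs
      by_cases hxy : x = y
      · subst hxy
        simp [invalid_face_scan]
      · have hnotin : x ∉ y :: rest := by
          intro hmem
          rcases List.mem_cons.mp hmem with h | h
          · exact hxy h
          · have hxy' : x ≤ y := hx y (List.mem_cons_self)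
            have hyx : y ≤ x := by
              rw [List.pairwise_cons] at hrest
              exact hrest.1 x h
            exact hxy (le_antisymm hxy' hyx)
        have : invalid_face_scan (x :: y :: rest) = invalid_face_scan (y :: rest) := by
          simp [invalid_face_scan, hxy]
        rw [this, ih hrest]
        simp [hnotin]

theorem invalid_face_eq_alt (face : List Int) : invalid_face face = invalid_face_alt face := by
  unfold invalid_face invalid_face_alt
  by_cases h : face.isEmpty
  · simp [h]
  · simp only [h, Bool.false_eq_true]
    rw [invalid_face_loop_eq,
        invalid_face_scan_eq _ (by simpa using PySem.List.sorted_pairwise face (fun x => x) )]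
    have hperm := PySem.List.sorted_perm face (fun x => x) false
    simp [hperm.nodup_iff]

-- ===== VERDICT (by name: the statement is the Claim_ definition above) =====
theorem invalid_face_spec : Claim_equal_invalid_face := by
  intro face _
  exact invalid_face_eq_alt face
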